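-- pv_equiv track=rewrite | github.com/KAFKA2306/DominionDeckDrawSimlator | optimaltranspalentmirror.py | generate_growth_coin_text
-- ===== SOURCE A (Python) =====
-- def calculate_growth_coins(initial_coins, max_turns):
--     coins = [initial_coins]
--     for _ in range(max_turns):
--         new_coins = coins[-1] * 2
--         total_coins = new_coins + initial_coins
--         coins.append(min(total_coins, 1560031))  # 上限を1560031に設定
--     return coins
--
-- def generate_growth_coin_text(held_coins_options, max_turns):
--     output = "JoinWars Precise Growth Coin Table\n"
--     output += "Turns | " + " | ".join([f"Initial: {coins}" for coins in held_coins_options]) + "\n"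
--     output += "-" * (7 + 11 * len(held_coins_options)) + "\n"
--
--     for turn in range(max_turns + 1):
--         output += f"{turn:5d} | "
--         for held_coins in held_coins_options:
--             growth_coins = calculate_growth_coins(held_coins, max_turns)
--             output += f"{growth_coins[turn]:9d} | "
--         output += "\n"
--
--     return output
-- ===== SOURCE B (Python) =====
-- def generate_growth_coin_text(held_coins_options, max_turns):
--     lines = ["JoinWars Precise Growth Coin Table",
--              "Turns | " + " | ".join(f"Initial: {c}" for c in held_coins_options),
--              "-" * (7 + 11 * len(held_coins_options))]
--     current = list(held_coins_options)
--     for turn in range(max_turns + 1):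
--         lines.append(f"{turn:5d} | " + "".join(f"{v:9d} | " for v in current))
--         current = [min(2 * v + c0, 1560031) for v, c0 in zip(current, held_coins_options)]
--     return "\n".join(lines) + "\n"
-- ===== Notes on version B (the rewrite author's own statement) =====
-- stated objective: faster
-- what changed: B keeps one running list of the current turn's coin values and updates it in place each turn (min(2*v+init, cap)), emitting rows as it goes, instead of A recomputing the entire growth sequence from scratch for every cell of the table.
import Mathlib
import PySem

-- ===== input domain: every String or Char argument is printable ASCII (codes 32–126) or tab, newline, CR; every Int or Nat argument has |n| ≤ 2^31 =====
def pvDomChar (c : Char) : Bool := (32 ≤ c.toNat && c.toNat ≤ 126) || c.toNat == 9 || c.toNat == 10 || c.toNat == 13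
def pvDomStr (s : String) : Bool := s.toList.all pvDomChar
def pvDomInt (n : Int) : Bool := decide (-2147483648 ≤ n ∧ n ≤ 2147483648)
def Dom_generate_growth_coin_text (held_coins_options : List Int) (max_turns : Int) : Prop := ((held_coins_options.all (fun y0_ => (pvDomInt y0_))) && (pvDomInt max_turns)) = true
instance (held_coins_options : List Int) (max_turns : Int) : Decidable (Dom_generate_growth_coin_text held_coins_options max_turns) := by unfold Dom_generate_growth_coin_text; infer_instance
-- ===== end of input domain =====

-- B computes each row from the previous one in a single pass (running values updated in
-- place) instead of A's per-cell recomputation of the whole coin sequence: same output, faster.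

-- f"{n:<w>d}": right-align str(n) in a field of width w, space-padded (shared format helper)
def pyFmtD (w : Nat) (n : Int) : String :=
  String.ofList (List.replicate (w - (PySem.Int.toChars n).length) ' ' ++ PySem.Int.toChars n)

-- ===== PORT A =====
def calculate_growth_coins (initial_coins : Int) (max_turns : Int) : List Int :=
  (PySem.List.pyRange 0 max_turns 1).foldl
    (fun coins _ =>
      let new_coins := (coins.getLast?.getD 0) * 2
      let total_coins := new_coins + initial_coins
      coins ++ [min total_coins 1560031])
    [initial_coins]

def generate_growth_coin_text (held_coins_options : List Int) (max_turns : Int) : String :=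
  let output := "JoinWars Precise Growth Coin Table\n"
  let output := output ++ "Turns | " ++
    PySem.Str.join " | " (held_coins_options.map (fun coins => "Initial: " ++ PySem.Int.toStr coins)) ++ "\n"
  let output := output ++ String.ofList (List.replicate (7 + 11 * held_coins_options.length) '-') ++ "\n"
  (PySem.List.pyRange 0 (max_turns + 1) 1).foldl
    (fun output turn =>
      let output := output ++ pyFmtD 5 turn ++ " | "
      let output := held_coins_options.foldl
        (fun output held_coins =>
          let growth_coins := calculate_growth_coins held_coins max_turns
          output ++ pyFmtD 9 (PySem.List.pyGetD growth_coins turn 0) ++ " | ")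
        output
      output ++ "\n")
    output

-- ===== PORT B =====
def generate_growth_coin_text_alt (held_coins_options : List Int) (max_turns : Int) : String :=
  let lines : List String :=
    ["JoinWars Precise Growth Coin Table",
     "Turns | " ++ PySem.Str.join " | " (held_coins_options.map (fun c => "Initial: " ++ PySem.Int.toStr c)),
     String.ofList (List.replicate (7 + 11 * held_coins_options.length) '-')]
  let st := (PySem.List.pyRange 0 (max_turns + 1) 1).foldl
    (fun (st : List String × List Int) turn =>
      let lines := st.1
      let current := st.2
      (lines ++ [pyFmtD 5 turn ++ " | " ++ PySem.Str.join "" (current.map (fun v => pyFmtD 9 v ++ " | "))],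
       (current.zip held_coins_options).map (fun p => min (2 * p.1 + p.2) 1560031)))
    (lines, held_coins_options)
  PySem.Str.join "\n" st.1 ++ "\n"

-- ===== PRECONDITION & SPEC =====
def Spec_generate_growth_coin_text (held_coins_options : List Int) (max_turns : Int) (out : String) : Prop := out = generate_growth_coin_text_alt held_coins_options max_turns
instance (held_coins_options : List Int) (max_turns : Int) (out : String) : Decidable (Spec_generate_growth_coin_text held_coins_options max_turns out) := by unfold Spec_generate_growth_coin_text; infer_instance

-- ===== CLAIM (what is proved, stated in full; the proofs are below) =====
def Claim_equal_generate_growth_coin_text : Prop := ∀ (held_coins_options : List Int) (max_turns : Int), Dom_generate_growth_coin_text held_coins_options max_turns → Spec_generate_growth_coin_text held_coins_options max_turns (generate_growth_coin_text held_coins_options max_turns)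

-- ===== LEMMAS AND PROOFS =====

def seq (c : Int) : Nat → Int
  | 0 => c
  | k + 1 => min (2 * seq c k + c) 1560031

theorem calc_aux (c : Int) (l : List Int) : ∀ (k : Nat),
    l.foldl (fun coins _ => coins ++ [min ((coins.getLast?.getD 0) * 2 + c) 1560031])
      ((List.range (k+1)).map (seq c))
    = (List.range (k + l.length + 1)).map (seq c) := by
  induction l with
  | nil => intro k; simp
  | cons x r ih =>
    intro k
    have hlast : (((List.range (k+1)).map (seq c)).getLast?.getD 0) = seq c k := by
      rw [List.range_succ, List.map_append]; simp
    simp only [List.foldl_cons, hlast]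
    have : (List.range (k+1)).map (seq c) ++ [min (seq c k * 2 + c) 1560031]
        = (List.range (k+2)).map (seq c) := by
      rw [show (k+2) = (k+1)+1 from rfl, List.range_succ (n := k+1), List.map_append]
      simp [seq, mul_comm]
    rw [this, ih (k+1)]
    have : k + 1 + r.length + 1 = k + (x :: r).length + 1 := by simp; omega
    rw [this]

theorem calc_eq (c : Int) (m : Int) :
    calculate_growth_coins c m = (List.range (m.toNat + 1)).map (seq c) := by
  unfold calculate_growth_coins
  have h0 : [c] = (List.range (0+1)).map (seq c) := by simp [seq]
  rw [h0]
  have := calc_aux c (PySem.List.pyRange 0 m 1) 0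
  simp only [this, PySem.List.length_pyRange_one]
  congr 2
  omega

def scat : List String → String
  | [] => ""
  | s :: r => s ++ scat r

theorem foldl_scat {α : Type} (g : α → String) : ∀ (l : List α) (a : String),
    l.foldl (fun o x => o ++ g x) a = a ++ scat (l.map g) := by
  intro l
  induction l with
  | nil => intro a; simp [scat]
  | cons x r ih => intro a; simp [scat, ih, String.append_assoc]

theorem Sjoin_singleton (sep p : String) : PySem.Str.join sep [p] = p := by
  apply String.toList_inj.mp
  simp [PySem.Str.toList_join, PySem.Chars.join_singleton]

theorem Sjoin_cons_cons (sep p q : String) (rest : List String) :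
    PySem.Str.join sep (p :: q :: rest) = p ++ sep ++ PySem.Str.join sep (q :: rest) := by
  apply String.toList_inj.mp
  simp [PySem.Str.toList_join, PySem.Chars.join_cons_cons]

theorem Sjoin_empty (l : List String) : PySem.Str.join "" l = scat l := by
  induction l with
  | nil =>
    apply String.toList_inj.mp
    simp [PySem.Str.toList_join, PySem.Chars.join_nil, scat]
  | cons s r ih =>
    cases r with
    | nil => simp [Sjoin_singleton, scat]
    | cons t r' => rw [Sjoin_cons_cons, ih]; simp [scat]

theorem join_nl (x : String) (l : List String) :
    PySem.Str.join "\n" (x :: l) ++ "\n" = x ++ "\n" ++ scat (l.map (· ++ "\n")) := by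
  induction l generalizing x with
  | nil => simp [Sjoin_singleton, scat]
  | cons y r ih =>
    rw [Sjoin_cons_cons]
    simp only [String.append_assoc, List.map_cons, scat]
    rw [ih y]
    simp [String.append_assoc]

def lineB (opts : List Int) (t : Int) : String :=
  pyFmtD 5 t ++ " | " ++ scat (opts.map (fun c => pyFmtD 9 (seq c t.toNat) ++ " | "))

theorem cell_eq (c m t : Int) (h0 : 0 ≤ t) (h1 : t < m + 1) :
    PySem.List.pyGetD (calculate_growth_coins c m) t 0 = seq c t.toNat := by
  rw [calc_eq, PySem.List.pyGetD_of_nonneg _ _ h0]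
  exact PySem.List.getD_map_range _ _ _ _ (by omega)

theorem A_outer (opts : List Int) (m : Int) : ∀ (l : List Int) (out0 : String),
    l.foldl
      (fun output turn =>
        (opts.foldl
          (fun output held_coins =>
            output ++ pyFmtD 9 (PySem.List.pyGetD (calculate_growth_coins held_coins m) turn 0) ++ " | ")
          (output ++ pyFmtD 5 turn ++ " | ")) ++ "\n")
      out0
    = out0 ++ scat (l.map (fun t =>
        pyFmtD 5 t ++ " | " ++
        scat (opts.map (fun c => pyFmtD 9 (PySem.List.pyGetD (calculate_growth_coins c m) t 0) ++ " | ")) ++ "\n")) := by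
  intro l
  induction l with
  | nil => intro a; simp [scat]
  | cons x r ih =>
    intro a
    simp only [List.foldl_cons, List.map_cons, scat]
    have hin := foldl_scat (fun c => pyFmtD 9 (PySem.List.pyGetD (calculate_growth_coins c m) x 0) ++ " | ") opts (a ++ pyFmtD 5 x ++ " | ")
    simp only [String.append_assoc] at *
    rw [hin, ih]
    simp [String.append_assoc]

theorem zip_self_map (f : Int → Int) (opts : List Int) :
    (opts.map f).zip opts = opts.map (fun c => (f c, c)) := by
  induction opts with
  | nil => simp
  | cons x r ih => simp [ih]

theorem B_fold (opts : List Int) (m : Int) : ∀ (n : Nat) (k : Int) (lines0 : List String),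
    0 ≤ k → (m + 1 - k).toNat = n →
    ((PySem.List.pyRange k (m+1) 1).foldl
      (fun (st : List String × List Int) turn =>
        (st.1 ++ [pyFmtD 5 turn ++ " | " ++ PySem.Str.join "" (st.2.map (fun v => pyFmtD 9 v ++ " | "))],
         (st.2.zip opts).map (fun p => min (2 * p.1 + p.2) 1560031)))
      (lines0, opts.map (fun c => seq c k.toNat))).1
    = lines0 ++ (PySem.List.pyRange k (m+1) 1).map (lineB opts) := by
  intro n
  induction n with
  | zero =>
    intro k lines0 hk hn
    rw [PySem.List.pyRange_one_eq_nil (by omega)]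
    simp
  | succ n ih =>
    intro k lines0 hk hn
    rw [PySem.List.pyRange_one_cons (by omega)]
    simp only [List.foldl_cons, List.map_cons]
    have hupd : ((opts.map (fun c => seq c k.toNat)).zip opts).map (fun p => min (2 * p.1 + p.2) 1560031)
        = opts.map (fun c => seq c (k+1).toNat) := by
      rw [zip_self_map, List.map_map]
      have : (k+1).toNat = k.toNat + 1 := by omega
      rw [this]
      rfl
    rw [hupd, ih (k+1) _ (by omega) (by omega)]
    have hrow : pyFmtD 5 k ++ " | " ++ PySem.Str.join "" ((opts.map (fun c => seq c k.toNat)).map (fun v => pyFmtD 9 v ++ " | "))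
        = lineB opts k := by
      rw [Sjoin_empty, List.map_map]; rfl
    rw [hrow, List.append_assoc]
    rfl

theorem main_eq (opts : List Int) (m : Int) :
    generate_growth_coin_text opts m = generate_growth_coin_text_alt opts m := by
  unfold generate_growth_coin_text generate_growth_coin_text_alt
  simp only []
  rw [A_outer]
  have hrows : (PySem.List.pyRange 0 (m+1) 1).map (fun t =>
        pyFmtD 5 t ++ " | " ++
        scat (opts.map (fun c => pyFmtD 9 (PySem.List.pyGetD (calculate_growth_coins c m) t 0) ++ " | ")) ++ "\n")
      = (PySem.List.pyRange 0 (m+1) 1).map (fun t => lineB opts t ++ "\n") := by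
    apply List.map_congr_left
    intro t ht
    rw [PySem.List.mem_pyRange_one] at ht
    have hcells : opts.map (fun c => pyFmtD 9 (PySem.List.pyGetD (calculate_growth_coins c m) t 0) ++ " | ")
        = opts.map (fun c => pyFmtD 9 (seq c t.toNat) ++ " | ") := by
      apply List.map_congr_left
      intro c _
      rw [cell_eq c m t ht.1 ht.2]
    rw [hcells]
    rfl
  rw [hrows]
  have hinit : opts.map (fun c => seq c (0:Int).toNat) = opts := by
    simp [Int.toNat_zero, seq]
  have hB := B_fold opts m (m + 1 - 0).toNat 0
    ["JoinWars Precise Growth Coin Table",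
     "Turns | " ++ PySem.Str.join " | " (opts.map (fun c => "Initial: " ++ PySem.Int.toStr c)),
     String.ofList (List.replicate (7 + 11 * opts.length) '-')] le_rfl rfl
  rw [hinit] at hB
  rw [hB]
  simp only [List.cons_append, List.nil_append]
  rw [Sjoin_cons_cons, Sjoin_cons_cons]
  simp only [String.append_assoc]
  rw [join_nl]
  rw [List.map_map]
  simp only [Function.comp_def, String.append_assoc]
  conv_lhs => rw [show ("JoinWars Precise Growth Coin Table\n" : String)
      = "JoinWars Precise Growth Coin Table" ++ "\n" from rfl]
  simp only [String.append_assoc]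


-- ===== VERDICT (by name: the statement is the Claim_ definition above) =====
theorem generate_growth_coin_text_spec : Claim_equal_generate_growth_coin_text := by
  intro held_coins_options max_turns _
  unfold Spec_generate_growth_coin_text
  exact main_eq held_coins_options max_turns
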